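-- pv_equiv track=rewrite | github.com/Econotool/Econotool | output/composite/parse.py | split_row_cells
-- ===== SOURCE A (Python) =====
-- def split_row_cells(row: str) -> list[str]:
--     """Split a tabular row on ``&`` — respecting ``\\multicolumn`` braces.
--
--     Raw splitting on ``&`` is correct for rows without nested braces, but
--     ``\\multicolumn{N}{c}{...}`` contains ``&``-free content in its third
--     argument so a naive split still works in practice.  We nonetheless
--     track brace depth to be safe.
--     """
--     cells: list[str] = []
--     depth = 0
--     current = []
--     for ch in row:
--         if ch == "{":
--             depth += 1
--             current.append(ch)
--         elif ch == "}":
--             depth -= 1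
--             current.append(ch)
--         elif ch == "&" and depth == 0:
--             cells.append("".join(current).strip())
--             current = []
--         else:
--             current.append(ch)
--     tail = "".join(current).strip()
--     if tail:
--         cells.append(tail)
--     return cells
-- ===== SOURCE B (Python) =====
-- def split_row_cells(row: str) -> list[str]:
--     # Phase 1: record the index of every '&' seen at brace depth 0.
--     depth = 0
--     bounds = []
--     for i, ch in enumerate(row):
--         if ch == "{":
--             depth += 1
--         elif ch == "}":
--             depth -= 1
--         elif ch == "&" and depth == 0:
--             bounds.append(i)
--     # Phase 2: slice the row at those boundaries and strip each piece.
--     cells = []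
--     prev = 0
--     for b in bounds:
--         cells.append(row[prev:b].strip())
--         prev = b + 1
--     tail = row[prev:].strip()
--     if tail:
--         cells.append(tail)
--     return cells
-- ===== Notes on version B (the rewrite author's own statement) =====
-- stated objective: alternative
-- what changed: Replaces A's character-accumulator loop (building each cell char by char) with a two-phase decomposition: one pass collecting the indices of top-level ampersand separators, then slicing the row at those boundaries and stripping each slice.
import Mathlib
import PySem

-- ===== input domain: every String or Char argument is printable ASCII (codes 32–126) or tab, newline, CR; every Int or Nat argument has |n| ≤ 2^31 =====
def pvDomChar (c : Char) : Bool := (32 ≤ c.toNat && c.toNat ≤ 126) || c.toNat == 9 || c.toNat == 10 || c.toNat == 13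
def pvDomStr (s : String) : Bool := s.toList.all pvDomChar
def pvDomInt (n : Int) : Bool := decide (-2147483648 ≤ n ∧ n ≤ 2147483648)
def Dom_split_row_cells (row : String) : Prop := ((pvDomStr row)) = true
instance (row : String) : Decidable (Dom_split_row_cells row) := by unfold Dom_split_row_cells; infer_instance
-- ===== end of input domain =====

-- B replaces A's character-accumulator loop with a two-phase boundaries-then-slice
-- decomposition (alternative, same O(n) cost).

-- ===== PORT A =====
-- the for-loop over row with state (cells, depth, current), then the tail step
def pvGoA : List Char → List String → Int → List Char → List String
  | [], cells, _depth, cur =>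
      let tail := PySem.Chars.strip cur
      if tail ≠ [] then cells ++ [String.ofList tail] else cells
  | c :: cs, cells, depth, cur =>
      if c = '{' then pvGoA cs cells (depth + 1) (cur ++ [c])
      else if c = '}' then pvGoA cs cells (depth - 1) (cur ++ [c])
      else if c = '&' ∧ depth = 0 then
        pvGoA cs (cells ++ [String.ofList (PySem.Chars.strip cur)]) depth []
      else pvGoA cs cells depth (cur ++ [c])

def split_row_cells (row : String) : List String :=
  pvGoA row.toList [] 0 []

-- ===== PORT B =====
-- phase 1: 'for i, ch in enumerate(row)' collecting indices of top-level '&'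
def pvBounds : List Char → Nat → Int → List Nat
  | [], _i, _depth => []
  | c :: cs, i, depth =>
      if c = '{' then pvBounds cs (i + 1) (depth + 1)
      else if c = '}' then pvBounds cs (i + 1) (depth - 1)
      else if c = '&' ∧ depth = 0 then i :: pvBounds cs (i + 1) depth
      else pvBounds cs (i + 1) depth

-- phase 2: 'for b in bounds' slicing row[prev:b], then the row[prev:] tail step
def pvSlices : List Nat → Nat → List Char → List String
  | [], prev, chars =>
      let tail := PySem.Chars.strip (chars.drop prev)
      if tail ≠ [] then [String.ofList tail] else []
  | b :: bs, prev, chars =>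
      String.ofList (PySem.Chars.strip ((chars.drop prev).take (b - prev))) ::
        pvSlices bs (b + 1) chars

def split_row_cells_alt (row : String) : List String :=
  pvSlices (pvBounds row.toList 0 0) 0 row.toList

-- ===== PRECONDITION & SPEC =====
def Spec_split_row_cells (row : String) (out : List String) : Prop := out = split_row_cells_alt row
instance (row : String) (out : List String) : Decidable (Spec_split_row_cells row out) := by unfold Spec_split_row_cells; infer_instance

-- ===== CLAIM (what is proved, stated in full; the proofs are below) =====
def Claim_equal_split_row_cells : Prop := ∀ (row : String), Dom_split_row_cells row → Spec_split_row_cells row (split_row_cells row)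

-- ===== LEMMAS AND PROOFS =====

-- boundary indices only shift when the enumeration counter shifts
theorem pvBounds_shift (cs : List Char) : ∀ (d : Int) (i : Nat),
    pvBounds cs i d = (pvBounds cs 0 d).map (· + i) := by
  induction cs with
  | nil => intro d i; simp [pvBounds]
  | cons c cs ih =>
      intro d i
      by_cases h1 : c = '{'
      · simp only [pvBounds, if_pos h1]
        rw [ih (d + 1) (i + 1), ih (d + 1) 1, List.map_map]
        apply List.map_congr_left; intro x _; simp [Function.comp]; omega
      · by_cases h2 : c = '}'
        · simp only [pvBounds, if_neg h1, if_pos h2]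
          rw [ih (d - 1) (i + 1), ih (d - 1) 1, List.map_map]
          apply List.map_congr_left; intro x _; simp [Function.comp]; omega
        · by_cases h3 : c = '&' ∧ d = 0
          · simp only [pvBounds, if_neg h1, if_neg h2, if_pos h3, List.map_cons]
            rw [ih d (i + 1), ih d 1, List.map_map]
            refine List.cons_eq_cons.mpr ⟨by omega, ?_⟩
            apply List.map_congr_left; intro x _; simp [Function.comp]; omega
          · simp only [pvBounds, if_neg h1, if_neg h2, if_neg h3]
            rw [ih d (i + 1), ih d 1, List.map_map]
            apply List.map_congr_left; intro x _; simp [Function.comp]; omega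

-- slicing with bounds shifted past a fixed prefix ignores that prefix
theorem pvSlices_localize (pre : List Char) : ∀ (bs : List Nat) (prev : Nat) (loc : List Char),
    pvSlices (bs.map (· + pre.length)) (prev + pre.length) (pre ++ loc) =
      pvSlices bs prev loc := by
  intro bs
  induction bs with
  | nil =>
      intro prev loc
      have : (pre ++ loc).drop (prev + pre.length) = loc.drop prev := by
        rw [Nat.add_comm, List.drop_append, List.drop_eq_nil_of_le (by omega),
          List.nil_append]
        congr 1; omega
      simp [pvSlices, this]
  | cons b bs ih =>
      intro prev loc
      have hd : (pre ++ loc).drop (prev + pre.length) = loc.drop prev := by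
        rw [Nat.add_comm, List.drop_append, List.drop_eq_nil_of_le (by omega),
          List.nil_append]
        congr 1; omega
      simp only [pvSlices, List.map_cons, hd]
      have htk : b + pre.length - (prev + pre.length) = b - prev := by omega
      rw [htk]
      have := ih (b + 1) loc
      rw [show b + pre.length + 1 = (b + 1) + pre.length by omega, this]

-- main invariant: A's loop from state (cells, depth, cur) equals cells ++ B's
-- slices of (cur ++ cs) at the bounds of cs shifted by cur.length
theorem pvMain (cs : List Char) : ∀ (d : Int) (cells : List String) (cur : List Char),
    pvGoA cs cells d cur =
      cells ++ pvSlices ((pvBounds cs 0 d).map (· + cur.length)) 0 (cur ++ cs) := by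
  induction cs with
  | nil =>
      intro d cells cur
      simp only [pvGoA, pvBounds, List.map_nil, pvSlices, List.append_nil, List.drop_zero]
      split <;> simp
  | cons c cs ih =>
      intro d cells cur
      by_cases h1 : c = '{'
      · simp only [pvGoA, pvBounds, if_pos h1]
        rw [ih (d + 1) cells (cur ++ [c]), pvBounds_shift cs (d + 1) 1, List.map_map]
        congr 2
        · apply List.map_congr_left; intro x _; simp [Function.comp]; omega
        · simp
      · by_cases h2 : c = '}'
        · simp only [pvGoA, pvBounds, if_neg h1, if_pos h2]
          rw [ih (d - 1) cells (cur ++ [c]), pvBounds_shift cs (d - 1) 1, List.map_map]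
          congr 2
          · apply List.map_congr_left; intro x _; simp [Function.comp]; omega
          · simp
        · by_cases h3 : c = '&' ∧ d = 0
          · simp only [pvGoA, pvBounds, if_neg h1, if_neg h2, if_pos h3]
            rw [ih d (cells ++ [String.ofList (PySem.Chars.strip cur)]) [],
              pvBounds_shift cs d 1]
            simp only [List.map_cons, pvSlices, List.map_map, List.length_nil,
              List.drop_zero, Nat.zero_add, Nat.sub_zero]
            have htake : (cur ++ c :: cs).take cur.length = cur := by
              simp
            have hmap : (pvBounds cs 0 d).map ((fun x => x + cur.length) ∘ (fun x => x + 1)) =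
                (pvBounds cs 0 d).map (· + (cur ++ [c]).length) := by
              apply List.map_congr_left; intro x _; simp [Function.comp]; omega
            have hloc := pvSlices_localize (cur ++ [c]) (pvBounds cs 0 d) 0 cs
            simp only [List.length_append, List.length_cons, List.length_nil,
              Nat.zero_add, List.append_assoc, List.singleton_append] at hloc
            rw [htake, hmap]
            have harith : cur.length + 1 = cur.length + (0 + 1) := by omega
            simp only [List.length_append, List.length_cons, List.length_nil] at hloc ⊢
            rw [show cur.length + 1 = 0 + (cur.length + 1) by omega] at hloc ⊢
            rw [hloc]
            simp
          · simp only [pvGoA, pvBounds, if_neg h1, if_neg h2, if_neg h3]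
            rw [ih d cells (cur ++ [c]), pvBounds_shift cs d 1, List.map_map]
            congr 2
            · apply List.map_congr_left; intro x _; simp [Function.comp]; omega
            · simp

-- ===== VERDICT (by name: the statement is the Claim_ definition above) =====
theorem split_row_cells_spec : Claim_equal_split_row_cells := by
  intro row _
  unfold Spec_split_row_cells split_row_cells split_row_cells_alt
  rw [pvMain row.toList 0 [] []]
  simp
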